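-- pv_equiv track=rewrite | github.com/dust-tt/dust | front/lib/api/sandbox/image/profile/_dust_tools.py | compile_glob_patterns
-- ===== SOURCE A (Python) =====
-- def _expand_braces(pattern):
--     start = pattern.find("{")
--     if start == -1:
--         return [pattern]
--
--     depth = 0
--     end = None
--     for index in range(start, len(pattern)):
--         if pattern[index] == "{":
--             depth += 1
--         elif pattern[index] == "}":
--             depth -= 1
--             if depth == 0:
--                 end = index
--                 break
--
--     if end is None:
--         return [pattern]
--
--     body = pattern[start + 1 : end]
--     parts = []
--     current = []
--     depth = 0
--     for ch in body:
--         if ch == "{":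
--             depth += 1
--         elif ch == "}":
--             depth -= 1
--         elif ch == "," and depth == 0:
--             parts.append("".join(current))
--             current = []
--             continue
--         current.append(ch)
--     parts.append("".join(current))
--
--     expanded = []
--     prefix = pattern[:start]
--     suffix = pattern[end + 1 :]
--     for part in parts:
--         expanded.extend(_expand_braces(prefix + part + suffix))
--     return expanded
--
-- def compile_glob_patterns(pattern):
--     compiled = []
--     seen = set()
--     for expanded in _expand_braces(pattern):
--         candidates = [expanded]
--         if expanded.startswith("**/"):
--             candidates.append(expanded[3:])
--         for candidate in candidates:
--             if candidate and candidate not in seen: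
--                 seen.add(candidate)
--                 compiled.append(candidate)
--     return compiled
-- ===== SOURCE B (Python) =====
-- def _first_group(pattern):
--     # One left-to-right pass: locate the first '{' and its matching '}',
--     # then split the body on top-level commas.  None if no balanced group.
--     start = None
--     depth = 0
--     for i, ch in enumerate(pattern):
--         if ch == "{":
--             if start is None:
--                 start = i
--             depth += 1
--         elif ch == "}" and start is not None:
--             depth -= 1
--             if depth == 0:
--                 body = pattern[start + 1 : i]
--                 parts = []
--                 cur = []
--                 d = 0
--                 for c in body:
--                     if c == "{":
--                         d += 1
--                     elif c == "}":
--                         d -= 1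
--                     elif c == "," and d == 0:
--                         parts.append("".join(cur))
--                         cur = []
--                         continue
--                     cur.append(c)
--                 parts.append("".join(cur))
--                 return pattern[:start], parts, pattern[i + 1 :]
--     return None
--
--
-- def compile_glob_patterns(pattern):
--     # Iterative DFS with an explicit stack instead of recursion.
--     expanded = []
--     stack = [pattern]
--     while stack:
--         p = stack.pop()
--         g = _first_group(p)
--         if g is None:
--             expanded.append(p)
--         else:
--             prefix, parts, suffix = g
--             for part in reversed(parts):
--                 stack.append(prefix + part + suffix)
--     # first-seen order-preserving dedup of the non-empty candidates
--     candidates = [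
--         c
--         for e in expanded
--         for c in ((e, e[3:]) if e.startswith("**/") else (e,))
--         if c
--     ]
--     return list(dict.fromkeys(candidates))
-- ===== Notes on version B (the rewrite author's own statement) =====
-- stated objective: alternative
-- what changed: Brace expansion is done iteratively with an explicit stack (DFS via pop/push-reversed) and a single-pass group finder that locates the first '{' and its matching '}' in one scan, instead of A's recursive find-then-rescan expansion; the dedup is a flatMap of candidates filtered and passed through an ordered first-seen dedup (dict.fromkeys) instead of A's hand-maintained compiled/seen pair.
import Mathlib
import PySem

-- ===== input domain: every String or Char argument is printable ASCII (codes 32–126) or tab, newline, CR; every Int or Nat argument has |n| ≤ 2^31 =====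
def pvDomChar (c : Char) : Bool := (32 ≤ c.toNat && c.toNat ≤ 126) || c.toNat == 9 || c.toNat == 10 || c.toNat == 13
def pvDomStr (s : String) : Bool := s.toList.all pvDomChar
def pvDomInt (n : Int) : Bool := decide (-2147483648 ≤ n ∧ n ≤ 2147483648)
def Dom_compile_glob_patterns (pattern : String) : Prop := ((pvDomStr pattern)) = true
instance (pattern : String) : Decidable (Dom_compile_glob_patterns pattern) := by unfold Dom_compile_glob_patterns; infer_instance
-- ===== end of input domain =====

-- B replaces A's recursive brace expansion by an iterative explicit-stack DFS with a single-pass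
-- group finder, and A's hand-maintained compiled/seen pair by a flatMap + ordered dedup; same value.
-- (Loops/recursions are ported with a fuel parameter that the lemmas prove sufficient.)

-- ===== PORT A =====
-- the `for index in range(start, len(pattern))` scan for the matching '}' (break returns the
-- index); fuel = number of remaining loop iterations (callers pass at least s.length - i)
def findEndA (s : List Char) : Nat → Nat → Int → Option Nat
  | 0, _, _ => none
  | fuel+1, i, depth =>
    if h : i < s.length then
      if s[i] = '{' then findEndA s fuel (i+1) (depth+1)
      else if s[i] = '}' then
        if depth - 1 = 0 then some i else findEndA s fuel (i+1) (depth-1)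
      else findEndA s fuel (i+1) depth
    else none

-- state: (parts, current, depth) of A's body-splitting loop
def splitStep (st : List (List Char) × List Char × Int) (ch : Char) :
    List (List Char) × List Char × Int :=
  if ch = '{' then (st.1, st.2.1 ++ [ch], st.2.2 + 1)
  else if ch = '}' then (st.1, st.2.1 ++ [ch], st.2.2 - 1)
  else if ch = ',' ∧ st.2.2 = 0 then (st.1 ++ [st.2.1], [], st.2.2)
  else (st.1, st.2.1 ++ [ch], st.2.2)

def splitParts (body : List Char) : List (List Char) :=
  let st := body.foldl splitStep ([], [], 0)
  st.1 ++ [st.2.1]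

-- _expand_braces; fuel bounds the recursion depth (every recursive call is on a string at least
-- two characters shorter, so l.length + 1 fuel always suffices — proved in expandAF_stable below)
def expandAF : Nat → List Char → List (List Char)
  | 0, l => [l]
  | fuel+1, l =>
    match l.findIdx? (fun c => c = '{') with
    | none => [l]
    | some start =>
      match findEndA l (l.length - start) start 0 with
      | none => [l]
      | some e =>
        (splitParts ((l.drop (start+1)).take (e - (start+1)))).foldl
          (fun acc q => acc ++ expandAF fuel (l.take start ++ q ++ l.drop (e+1))) []

def expandA (l : List Char) : List (List Char) := expandAF (l.length + 1) l

def innerStepA (st : List (List Char) × PySem.Set (List Char)) (c : List Char) :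
    List (List Char) × PySem.Set (List Char) :=
  if c ≠ [] ∧ ¬ PySem.Set.contains st.2 c then (st.1 ++ [c], PySem.Set.add st.2 c) else st

-- candidates = [expanded] (+ expanded[3:] when it starts with "**/"; e[3:] = drop 3, exact since 3 ≥ 0)
def candidatesOfA (e : List Char) : List (List Char) :=
  if PySem.Chars.startswith e ['*', '*', '/'] then [e, e.drop 3] else [e]

def compile_glob_patterns (pattern : String) : List String :=
  ((expandA pattern.toList).foldl
      (fun st e => (candidatesOfA e).foldl innerStepA st)
      ([], PySem.Set.empty)).1.map String.mk

-- ===== PORT B =====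
def splitStepB (st : List (List Char) × List Char × Int) (ch : Char) :
    List (List Char) × List Char × Int :=
  if ch = '{' then (st.1, st.2.1 ++ [ch], st.2.2 + 1)
  else if ch = '}' then (st.1, st.2.1 ++ [ch], st.2.2 - 1)
  else if ch = ',' ∧ st.2.2 = 0 then (st.1 ++ [st.2.1], [], st.2.2)
  else (st.1, st.2.1 ++ [ch], st.2.2)

def splitPartsB (body : List Char) : List (List Char) :=
  let st := body.foldl splitStepB ([], [], 0)
  st.1 ++ [st.2.1]

-- the single `for i, ch in enumerate(pattern)` loop of _first_group; fuel = remaining iterations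
def fgLoop (s : List Char) : Nat → Nat → Option Nat → Int →
    Option (List Char × List (List Char) × List Char)
  | 0, _, _, _ => none
  | fuel+1, i, start?, depth =>
    if h : i < s.length then
      if s[i] = '{' then
        fgLoop s fuel (i+1) (if start?.isNone then some i else start?) (depth+1)
      else if s[i] = '}' ∧ start?.isSome then
        if depth - 1 = 0 then
          match start? with
          | some start =>
            some (s.take start, splitPartsB ((s.drop (start+1)).take (i - (start+1))),
              s.drop (i+1))
          | none => none
        else fgLoop s fuel (i+1) start? (depth-1)
      else fgLoop s fuel (i+1) start? depth
    else none

def firstGroupB (l : List Char) : Option (List Char × List (List Char) × List Char) :=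
  fgLoop l l.length 0 none 0

def pvMu (st : List (List Char)) : Nat := (st.map (fun p => (p.length + 1).factorial)).sum

-- the `while stack:` loop; the Python list is used as a stack (pop from the end, parts pushed in
-- reverse), modelled here top-first; fuel bounds the number of iterations (pvMu suffices — proved
-- in runBF_flatMap below)
def runBF : Nat → List (List Char) → List (List Char)
  | _, [] => []
  | 0, stack => stack
  | fuel+1, p :: rest =>
    match firstGroupB p with
    | none => p :: runBF fuel rest
    | some g => runBF fuel ((g.2.1.map (fun part => g.1 ++ part ++ g.2.2)) ++ rest)

def runB (stack : List (List Char)) : List (List Char) := runBF (pvMu stack) stack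

def compile_glob_patterns_alt (pattern : String) : List String :=
  (PySem.List.dedup
    ((runB [pattern.toList]).flatMap
      (fun e =>
        (if PySem.Chars.startswith e ['*', '*', '/'] then [e, e.drop 3] else [e]).filter
          (fun c => decide (c ≠ []))))).map String.mk

-- ===== PRECONDITION & SPEC =====
def Spec_compile_glob_patterns (pattern : String) (out : List String) : Prop := out = compile_glob_patterns_alt pattern
instance (pattern : String) (out : List String) : Decidable (Spec_compile_glob_patterns pattern out) := by unfold Spec_compile_glob_patterns; infer_instance

-- ===== CLAIM (what is proved, stated in full; the proofs are below) =====
def Claim_equal_compile_glob_patterns : Prop := ∀ (pattern : String), Dom_compile_glob_patterns pattern → Spec_compile_glob_patterns pattern (compile_glob_patterns pattern)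

-- ===== LEMMAS AND PROOFS =====

lemma splitFold_bounds (l : List Char) : ∀ (parts : List (List Char)) (cur : List Char) (d : Int),
    (∀ q ∈ (l.foldl splitStep (parts, cur, d)).1 ++ [(l.foldl splitStep (parts, cur, d)).2.1],
        q ∈ parts ∨ q.length ≤ cur.length + l.length)
    ∧ (l.foldl splitStep (parts, cur, d)).1.length ≤ parts.length + l.length := by
  induction l with
  | nil =>
    intro parts cur d
    refine ⟨fun q hq => ?_, by simp⟩
    simp only [List.foldl_nil] at hq
    rcases List.mem_append.mp hq with h | h
    · exact Or.inl h
    · simp at h; subst h; right; simp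
  | cons c l ih =>
    intro parts cur d
    simp only [List.foldl_cons, splitStep]
    split_ifs with h1 h2 h3
    · refine ⟨fun q hq => ?_, ?_⟩
      · rcases (ih parts (cur ++ [c]) (d+1)).1 q hq with h | h
        · exact Or.inl h
        · right; simp at h ⊢; omega
      · have := (ih parts (cur ++ [c]) (d+1)).2; simp at this ⊢; omega
    · refine ⟨fun q hq => ?_, ?_⟩
      · rcases (ih parts (cur ++ [c]) (d-1)).1 q hq with h | h
        · exact Or.inl h
        · right; simp at h ⊢; omega
      · have := (ih parts (cur ++ [c]) (d-1)).2; simp at this ⊢; omega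
    · refine ⟨fun q hq => ?_, ?_⟩
      · rcases (ih (parts ++ [cur]) [] d).1 q hq with h | h
        · simp at h; rcases h with h | h
          · exact Or.inl h
          · right; simp [h]
        · right; simp at h ⊢; omega
      · have := (ih (parts ++ [cur]) [] d).2; simp at this ⊢; omega
    · refine ⟨fun q hq => ?_, ?_⟩
      · rcases (ih parts (cur ++ [c]) d).1 q hq with h | h
        · exact Or.inl h
        · right; simp at h ⊢; omega
      · have := (ih parts (cur ++ [c]) d).2; simp at this ⊢; omega

lemma splitParts_mem_bound (body : List Char) (q : List Char) (hq : q ∈ splitParts body) :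
    q.length ≤ body.length := by
  have := (splitFold_bounds body [] [] 0).1 q hq
  simpa using this

lemma splitParts_count (body : List Char) : (splitParts body).length ≤ body.length + 1 := by
  have := (splitFold_bounds body [] [] 0).2
  simp [splitParts] at this ⊢; omega

lemma splitPartsB_eq : splitPartsB = splitParts := rfl

lemma findEndA_bounds (s : List Char) : ∀ (fuel i : Nat) (d : Int) (e : Nat),
    findEndA s fuel i d = some e → i ≤ e ∧ e < s.length := by
  intro fuel
  induction fuel with
  | zero => intro i d e h; simp [findEndA] at h
  | succ fuel ih =>
    intro i d e h
    simp only [findEndA] at h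
    by_cases hi : i < s.length
    · rw [dif_pos hi] at h
      by_cases hc : s[i] = '{'
      · rw [if_pos hc] at h; have := ih _ _ _ h; omega
      · rw [if_neg hc] at h
        by_cases hc2 : s[i] = '}'
        · rw [if_pos hc2] at h
          by_cases hd : d - 1 = 0
          · rw [if_pos hd] at h; simp at h; omega
          · rw [if_neg hd] at h; have := ih _ _ _ h; omega
        · rw [if_neg hc2] at h; have := ih _ _ _ h; omega
    · rw [dif_neg hi] at h; cases h

lemma findEndA_irrel (s : List Char) : ∀ (f1 f2 i : Nat) (d : Int),
    s.length - i ≤ f1 → s.length - i ≤ f2 → findEndA s f1 i d = findEndA s f2 i d := by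
  intro f1
  induction f1 with
  | zero =>
    intro f2 i d h1 h2
    have hi : ¬ i < s.length := by omega
    cases f2 with
    | zero => rfl
    | succ f2 => simp [findEndA, hi]
  | succ f1 ih =>
    intro f2 i d h1 h2
    by_cases hi : i < s.length
    · cases f2 with
      | zero => omega
      | succ f2 =>
        simp only [findEndA, dif_pos hi]
        by_cases hc : s[i] = '{'
        · rw [if_pos hc, if_pos hc]; exact ih f2 (i+1) (d+1) (by omega) (by omega)
        · rw [if_neg hc, if_neg hc]
          by_cases hc2 : s[i] = '}'
          · rw [if_pos hc2, if_pos hc2]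
            by_cases hd : d - 1 = 0
            · rw [if_pos hd, if_pos hd]
            · rw [if_neg hd, if_neg hd]; exact ih f2 (i+1) (d-1) (by omega) (by omega)
          · rw [if_neg hc2, if_neg hc2]; exact ih f2 (i+1) d (by omega) (by omega)
    · cases f2 with
      | zero => simp [findEndA, hi]
      | succ f2 => simp [findEndA, hi]

-- bounds on a found group (start from find, e from the matching scan)
lemma found_facts (l : List Char) (start e : Nat)
    (hs : l.findIdx? (fun c => c = '{') = some start)
    (he : findEndA l (l.length - start) start 0 = some e) :
    start < l.length ∧ start + 1 ≤ e ∧ e < l.length := by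
  obtain ⟨hlt, hchar, -⟩ := List.findIdx?_eq_some_iff_getElem.mp hs
  have hfe : l.length - start = (l.length - (start+1)) + 1 := by omega
  rw [hfe] at he
  simp only [findEndA] at he
  rw [dif_pos hlt, if_pos (by simpa using hchar)] at he
  have hb := findEndA_bounds l _ _ _ _ he
  exact ⟨hlt, by omega, by omega⟩

lemma sub_len (l : List Char) (start e : Nat) (q : List Char)
    (hs : l.findIdx? (fun c => c = '{') = some start)
    (he : findEndA l (l.length - start) start 0 = some e)
    (hq : q ∈ splitParts ((l.drop (start+1)).take (e - (start+1)))) :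
    (l.take start ++ q ++ l.drop (e+1)).length + 2 ≤ l.length := by
  obtain ⟨h1, h2, h3⟩ := found_facts l start e hs he
  have hqb := splitParts_mem_bound _ _ hq
  simp only [List.length_take, List.length_drop] at hqb
  simp only [List.length_append, List.length_take, List.length_drop]
  omega

-- one-step unfoldings of expandAF at successor fuel
lemma expandAF_succ_nofind (fuel : Nat) (l : List Char)
    (h : l.findIdx? (fun c => c = '{') = none) : expandAF (fuel+1) l = [l] := by
  simp only [expandAF]
  split
  · rfl
  · rename_i start heq; rw [h] at heq; cases heq

lemma expandAF_succ_noend (fuel : Nat) (l : List Char) (start : Nat)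
    (h1 : l.findIdx? (fun c => c = '{') = some start)
    (h2 : findEndA l (l.length - start) start 0 = none) : expandAF (fuel+1) l = [l] := by
  simp only [expandAF]
  split
  · rfl
  · rename_i start' heq
    rw [h1] at heq; cases heq
    split
    · rfl
    · rename_i e heq2; rw [h2] at heq2; cases heq2

lemma expandAF_succ_found (fuel : Nat) (l : List Char) (start e : Nat)
    (h1 : l.findIdx? (fun c => c = '{') = some start)
    (h2 : findEndA l (l.length - start) start 0 = some e) :
    expandAF (fuel+1) l = (splitParts ((l.drop (start+1)).take (e - (start+1)))).foldl
      (fun acc q => acc ++ expandAF fuel (l.take start ++ q ++ l.drop (e+1))) [] := by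
  simp only [expandAF]
  split
  · rename_i heq; rw [h1] at heq; cases heq
  · rename_i start' heq
    rw [h1] at heq; cases heq
    split
    · rename_i heq2; rw [h2] at heq2; cases heq2
    · rename_i e' heq2; rw [h2] at heq2; cases heq2; rfl

-- any fuel above the recursion depth computes _expand_braces
lemma expandAF_stable : ∀ (fuel fuel' : Nat) (l : List Char),
    l.length < fuel' → fuel' ≤ fuel → expandAF fuel' l = expandA l := by
  intro fuel
  induction fuel with
  | zero => intro fuel' l h1 h2; omega
  | succ fuel ih =>
    intro fuel' l h1 h2
    cases fuel' with
    | zero => omega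
    | succ k =>
      rw [show expandA l = expandAF (l.length + 1) l from rfl]
      cases hs : l.findIdx? (fun c => c = '{') with
      | none => rw [expandAF_succ_nofind k l hs, expandAF_succ_nofind l.length l hs]
      | some start =>
        cases he : findEndA l (l.length - start) start 0 with
        | none => rw [expandAF_succ_noend k l start hs he, expandAF_succ_noend l.length l start hs he]
        | some e =>
          rw [expandAF_succ_found k l start e hs he, expandAF_succ_found l.length l start e hs he]
          apply PySem.List.foldl_congr_mem
          intro acc q hq
          have hsub := sub_len l start e q hs he hq
          rw [ih k _ (by omega) (by omega), ih l.length _ (by omega) (by omega)]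

lemma expandA_nofind (l : List Char) (h : l.findIdx? (fun c => c = '{') = none) :
    expandA l = [l] := expandAF_succ_nofind l.length l h

lemma expandA_noend (l : List Char) (start : Nat)
    (h1 : l.findIdx? (fun c => c = '{') = some start)
    (h2 : findEndA l (l.length - start) start 0 = none) :
    expandA l = [l] := expandAF_succ_noend l.length l start h1 h2

lemma expandA_found (l : List Char) (start e : Nat)
    (h1 : l.findIdx? (fun c => c = '{') = some start)
    (h2 : findEndA l (l.length - start) start 0 = some e) :
    expandA l = (splitParts ((l.drop (start+1)).take (e - (start+1)))).flatMap
      (fun q => expandA (l.take start ++ q ++ l.drop (e+1))) := by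
  rw [show expandA l = expandAF (l.length + 1) l from rfl]
  rw [expandAF_succ_found l.length l start e h1 h2]
  trans ((splitParts ((l.drop (start+1)).take (e - (start+1)))).foldl
    (fun acc q => acc ++ expandA (l.take start ++ q ++ l.drop (e+1))) [])
  · apply PySem.List.foldl_congr_mem
    intro acc q hq
    rw [expandAF_stable l.length l.length _
      (by have := sub_len l start e q h1 h2 hq; omega) (le_refl _)]
  · rw [PySem.List.foldl_append_eq_flatMap]
    simp

-- B's scan, once the first '{' has been seen at `start`, is A's matching-'}' scan
lemma fgLoop_some_eq (s : List Char) (start : Nat) : ∀ (fuel i : Nat) (d : Int),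
    fgLoop s fuel i (some start) d =
      match findEndA s fuel i d with
      | none => none
      | some e => some (s.take start, splitPartsB ((s.drop (start+1)).take (e - (start+1))),
          s.drop (e+1)) := by
  intro fuel
  induction fuel with
  | zero => intro i d; rfl
  | succ fuel ih =>
    intro i d
    simp only [fgLoop, findEndA]
    by_cases hi : i < s.length
    · rw [dif_pos hi, dif_pos hi]
      by_cases hc : s[i] = '{'
      · rw [if_pos hc, if_pos hc]
        simpa using ih (i+1) (d+1)
      · rw [if_neg hc, if_neg hc]
        by_cases hc2 : s[i] = '}'
        · rw [if_pos (by simp [hc2]), if_pos hc2]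
          by_cases hd : d - 1 = 0
          · rw [if_pos hd, if_pos hd]
          · rw [if_neg hd, if_neg hd]; exact ih (i+1) (d-1)
        · rw [if_neg (by simp [hc2]), if_neg hc2]; exact ih (i+1) d
    · rw [dif_neg hi, dif_neg hi]

-- B's scan before any '{' is A's pattern.find("{") followed by the matching-'}' scan
lemma fgLoop_none_eq (s : List Char) : ∀ (fuel i : Nat), s.length - i ≤ fuel →
    fgLoop s fuel i none 0 =
      match (s.drop i).findIdx? (fun c => c = '{') with
      | none => none
      | some k =>
        match findEndA s (s.length - (i+k)) (i+k) 0 with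
        | none => none
        | some e => some (s.take (i+k), splitPartsB ((s.drop (i+k+1)).take (e - (i+k+1))),
            s.drop (e+1)) := by
  intro fuel
  induction fuel with
  | zero =>
    intro i hle
    rw [List.drop_eq_nil_of_le (by omega)]
    rfl
  | succ fuel ih =>
    intro i hle
    by_cases hi : i < s.length
    · rw [List.drop_eq_getElem_cons hi, List.findIdx?_cons]
      by_cases hc : s[i] = '{'
      · simp only [fgLoop, dif_pos hi, Option.isNone_none, if_pos, hc, decide_true,
          Nat.add_zero]
        rw [fgLoop_some_eq]
        rw [findEndA_irrel s fuel (s.length - (i+1)) (i+1) (0+1) (by omega) (by omega)]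
        rw [show findEndA s (s.length - i) i 0
            = findEndA s (s.length - (i+1)) (i+1) (0+1) from by
          rw [show s.length - i = (s.length - (i+1)) + 1 from by omega]
          simp only [findEndA]
          rw [dif_pos hi, if_pos hc]]
      · simp only [fgLoop, dif_pos hi, if_neg hc]
        rw [if_neg (show ¬(s[i] = '}' ∧ (none : Option Nat).isSome = true) by simp)]
        rw [ih (i+1) (by omega)]
        simp only [hc, decide_false, Bool.false_eq_true, if_false]
        cases hk : (s.drop (i+1)).findIdx? (fun c => c = '{') with
        | none => simp
        | some k =>
          simp only [Option.map_some]
          have h1 : i + (k + 1) = i + 1 + k := by omega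
          rw [h1]
    · rw [List.drop_eq_nil_of_le (by omega)]
      simp only [fgLoop, dif_neg hi]
      rfl

-- B's one-pass group finder computes exactly what A's find + scan + split compute
lemma firstGroupB_eq (l : List Char) :
    firstGroupB l =
      match l.findIdx? (fun c => c = '{') with
      | none => none
      | some start =>
        match findEndA l (l.length - start) start 0 with
        | none => none
        | some e => some (l.take start, splitParts ((l.drop (start+1)).take (e - (start+1))),
            l.drop (e+1)) := by
  have h := fgLoop_none_eq l l.length 0 (by omega)
  simpa [firstGroupB, splitPartsB_eq] using h

lemma firstGroupB_bounds (p : List Char)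
    (g : List Char × List (List Char) × List Char)
    (h : firstGroupB p = some g) :
    (∀ q ∈ g.2.1, g.1.length + q.length + g.2.2.length + 2 ≤ p.length)
    ∧ g.1.length + g.2.1.length + g.2.2.length + 1 ≤ p.length := by
  rw [firstGroupB_eq] at h
  split at h
  · cases h
  · rename_i start h1
    split at h
    · cases h
    · rename_i e h2
      simp only [Option.some.injEq] at h
      subst h
      obtain ⟨hl1, hl2, hl3⟩ := found_facts p start e h1 h2
      constructor
      · intro q hq
        have hb := splitParts_mem_bound _ _ hq
        simp only [List.length_take, List.length_drop] at hb ⊢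
        omega
      · have hb := splitParts_count ((p.drop (start+1)).take (e - (start+1)))
        simp only [List.length_take, List.length_drop] at hb ⊢
        omega

lemma pvMu_dec2 (p : List Char) (rest : List (List Char))
    (g : List Char × List (List Char) × List Char) (hg : firstGroupB p = some g) :
    pvMu (g.2.1.map (fun part => g.1 ++ part ++ g.2.2) ++ rest) < pvMu (p :: rest) := by
  obtain ⟨hq, hcnt⟩ := firstGroupB_bounds p g hg
  simp only [pvMu, List.map_cons, List.sum_cons, List.map_append, List.sum_append, List.map_map]
  have hterm : ∀ x ∈ g.2.1.map ((fun p => (p.length + 1).factorial) ∘ fun part => g.1 ++ part ++ g.2.2),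
      x ≤ (p.length - 1).factorial := by
    intro x hx
    simp only [List.mem_map, Function.comp] at hx
    obtain ⟨part, hpart, rfl⟩ := hx
    have := hq part hpart
    apply Nat.factorial_le
    simp only [List.length_append]
    omega
  have hsum := List.sum_le_card_nsmul _ _ hterm
  simp only [List.length_map, smul_eq_mul] at hsum
  have hlen : g.2.1.length ≤ p.length - 1 := by omega
  have h1 : 1 ≤ p.length := by omega
  have hpos := Nat.factorial_pos (p.length - 1)
  have e1 : (p.length).factorial = p.length * (p.length - 1).factorial := by
    have hp : p.length - 1 + 1 = p.length := by omega
    conv_lhs => rw [← hp]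
    rw [Nat.factorial_succ, hp]
  have e2 : (p.length + 1).factorial = (p.length + 1) * (p.length).factorial := Nat.factorial_succ _
  have hlt : (g.2.1.map ((fun p => (p.length + 1).factorial) ∘ fun part => g.1 ++ part ++ g.2.2)).sum
      < (p.length + 1).factorial := by
    nlinarith [hsum, hlen, hpos, Nat.factorial_pos p.length]
  omega

-- the explicit stack runs A's recursion: with enough fuel, the stack machine's output is the
-- concatenation of the expansions of the stack entries
lemma runBF_flatMap : ∀ (fuel : Nat) (stack : List (List Char)), pvMu stack ≤ fuel →
    runBF fuel stack = stack.flatMap expandA := by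
  intro fuel
  induction fuel with
  | zero =>
    intro stack hle
    cases stack with
    | nil => rfl
    | cons p rest =>
      exfalso
      have := Nat.factorial_pos (p.length + 1)
      simp only [pvMu, List.map_cons, List.sum_cons] at hle
      omega
  | succ fuel ih =>
    intro stack hle
    cases stack with
    | nil => rfl
    | cons p rest =>
      simp only [runBF]
      cases hg : firstGroupB p with
      | none =>
        rw [List.flatMap_cons]
        rw [ih rest (by
          have := Nat.factorial_pos (p.length + 1)
          simp only [pvMu, List.map_cons, List.sum_cons] at hle ⊢
          omega)]
        rw [firstGroupB_eq] at hg
        split at hg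
        · rename_i h1; rw [expandA_nofind p h1]; simp
        · rename_i start h1
          split at hg
          · rename_i h2; rw [expandA_noend p start h1 h2]; simp
          · cases hg
      | some g =>
        show runBF fuel ((g.2.1.map (fun part => g.1 ++ part ++ g.2.2)) ++ rest)
          = (p :: rest).flatMap expandA
        rw [ih _ (by have := pvMu_dec2 p rest g hg; omega)]
        rw [List.flatMap_append, List.flatMap_cons]
        rw [firstGroupB_eq] at hg
        split at hg
        · cases hg
        · rename_i start h1
          split at hg
          · cases hg
          · rename_i e h2
            simp only [Option.some.injEq] at hg
            subst hg
            rw [expandA_found p start e h1 h2, List.flatMap_map]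

lemma runB_flatMap (stack : List (List Char)) : runB stack = stack.flatMap expandA :=
  runBF_flatMap (pvMu stack) stack (le_refl _)

-- the single-list normal form of the dedup loop
def pvDedup (acc : List (List Char)) (c : List Char) : List (List Char) :=
  if c ≠ [] ∧ ¬ PySem.Set.contains acc c then acc ++ [c] else acc

lemma innerA_pair : ∀ (cs : List (List Char)) (acc : List (List Char)),
    cs.foldl innerStepA (acc, acc) = (cs.foldl pvDedup acc, cs.foldl pvDedup acc) := by
  intro cs
  induction cs with
  | nil => intro acc; rfl
  | cons c cs ih =>
    intro acc
    simp only [List.foldl_cons, innerStepA, pvDedup]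
    by_cases h : c ≠ [] ∧ ¬ PySem.Set.contains acc c
    · rw [if_pos h, if_pos h]
      have hadd : PySem.Set.add acc c = acc ++ [c] := by
        simp only [PySem.Set.add]
        rw [if_neg h.2]
      rw [hadd]
      exact ih (acc ++ [c])
    · rw [if_neg h, if_neg h]
      exact ih acc

lemma outerA_pair : ∀ (es : List (List Char)) (acc : List (List Char)),
    es.foldl (fun st e => (candidatesOfA e).foldl innerStepA st) (acc, acc)
      = ((es.flatMap candidatesOfA).foldl pvDedup acc,
         (es.flatMap candidatesOfA).foldl pvDedup acc) := by
  intro es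
  induction es with
  | nil => intro acc; rfl
  | cons e es ih =>
    intro acc
    simp only [List.foldl_cons, List.flatMap_cons, List.foldl_append]
    rw [innerA_pair]
    exact ih _

-- B's filtered flatMap + ordered dedup is the same single-list fold
lemma dedupB_eq (es : List (List Char)) :
    PySem.List.dedup (es.flatMap (fun e =>
        (if PySem.Chars.startswith e ['*', '*', '/'] then [e, e.drop 3] else [e]).filter
          (fun c => decide (c ≠ []))))
      = (es.flatMap candidatesOfA).foldl pvDedup [] := by
  rw [show (fun e => (if PySem.Chars.startswith e ['*', '*', '/'] then [e, e.drop 3]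
      else [e]).filter (fun c => decide (c ≠ [])))
    = (fun e => (candidatesOfA e).filter (fun c => decide (c ≠ []))) from rfl]
  rw [← List.filter_flatMap]
  rw [PySem.List.dedup_eq_ofList, PySem.Set.ofList_eq_foldl]
  rw [← PySem.List.foldl_ite_eq_foldl_filter (fun c => c ≠ []) PySem.Set.add]
  apply PySem.List.foldl_congr_mem
  intro acc c _
  simp only [pvDedup, PySem.Set.add]
  by_cases h1 : c = []
  · simp [h1]
  · simp [h1, PySem.Set.contains]

-- ===== VERDICT (by name: the statement is the Claim_ definition above) =====
theorem compile_glob_patterns_spec : Claim_equal_compile_glob_patterns := by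
  intro pattern _
  unfold Spec_compile_glob_patterns compile_glob_patterns compile_glob_patterns_alt
  rw [runB_flatMap]
  simp only [List.flatMap_cons, List.flatMap_nil, List.append_nil]
  rw [dedupB_eq]
  rw [show (([], PySem.Set.empty) : List (List Char) × PySem.Set (List Char))
    = (([], []) : List (List Char) × List (List Char)) from rfl]
  rw [outerA_pair]
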